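-- pv_equiv track=rewrite | github.com/GenesisInc/bible-text | process_bible_text.py | sort_bible_data
-- ===== SOURCE A (Python) =====
-- BOOK_ORDER = [
--     "genesis",
--     "exodus",
--     "leviticus",
--     "numbers",
--     "deuteronomy",
--     "joshua",
--     "judges",
--     "ruth",
--     "1 samuel",
--     "2 samuel",
--     "1 kings",
--     "2 kings",
--     "1 chronicles",
--     "2 chronicles",
--     "ezra",
--     "nehemiah",
--     "esther",
--     "job",
--     "psalms",
--     "proverbs",
--     "ecclesiastes",
--     "song of solomon",
--     "isaiah",
--     "jeremiah",
--     "lamentations",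
--     "ezekiel",
--     "daniel",
--     "hosea",
--     "joel",
--     "amos",
--     "obadiah",
--     "jonah",
--     "micah",
--     "nahum",
--     "habakkuk",
--     "zephaniah",
--     "haggai",
--     "zechariah",
--     "malachi",
--     "matthew",
--     "mark",
--     "luke",
--     "john",
--     "acts",
--     "romans",
--     "1 corinthians",
--     "2 corinthians",
--     "galatians",
--     "ephesians",
--     "philippians",
--     "colossians",
--     "1 thessalonians",
--     "2 thessalonians",
--     "1 timothy",
--     "2 timothy",
--     "titus",
--     "philemon",
--     "hebrews",
--     "james",
--     "1 peter",
--     "2 peter",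
--     "1 john",
--     "2 john",
--     "3 john",
--     "jude",
--     "revelation",
-- ]
--
-- def sort_bible_data(bible_data):
--     """Sort Bible data by predefined order."""
--     sorted_data = {}
--     for book in BOOK_ORDER:
--         if book in bible_data:
--             chapters = bible_data[book]
--             sorted_chapters = {
--                 str(ch): verses
--                 for ch, verses in sorted(
--                     ((int(c), v) for c, v in chapters.items()), key=lambda x: x[0]
--                 )
--             }
--             sorted_data[book] = sorted_chapters
--     return sorted_data
-- ===== SOURCE B (Python) =====
-- BOOK_ORDER = [
--     "genesis", "exodus", "leviticus", "numbers", "deuteronomy", "joshua",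
--     "judges", "ruth", "1 samuel", "2 samuel", "1 kings", "2 kings",
--     "1 chronicles", "2 chronicles", "ezra", "nehemiah", "esther", "job",
--     "psalms", "proverbs", "ecclesiastes", "song of solomon", "isaiah",
--     "jeremiah", "lamentations", "ezekiel", "daniel", "hosea", "joel", "amos",
--     "obadiah", "jonah", "micah", "nahum", "habakkuk", "zephaniah", "haggai",
--     "zechariah", "malachi", "matthew", "mark", "luke", "john", "acts",
--     "romans", "1 corinthians", "2 corinthians", "galatians", "ephesians",
--     "philippians", "colossians", "1 thessalonians", "2 thessalonians",
--     "1 timothy", "2 timothy", "titus", "philemon", "hebrews", "james",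
--     "1 peter", "2 peter", "1 john", "2 john", "3 john", "jude", "revelation",
-- ]
--
--
-- def sort_bible_data(bible_data):
--     """Sort Bible data by predefined order (sort the present keys by position)."""
--     index = {book: i for i, book in enumerate(BOOK_ORDER)}
--     books = sorted((b for b in bible_data if b in index), key=lambda b: index[b])
--     return {
--         b: {
--             str(int(c)): v
--             for c, v in sorted(bible_data[b].items(), key=lambda kv: int(kv[0]))
--         }
--         for b in books
--     }
-- ===== Notes on version B (the rewrite author's own statement) =====
-- stated objective: alternative
-- what changed: A scans the fixed BOOK_ORDER list probing the data dict; B builds a book->position index once, takes the data's keys that appear in it, sorts them by position, and sorts each chapter dict's own items by int key instead of rebuilding (int, verses) pairs.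
import Mathlib
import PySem

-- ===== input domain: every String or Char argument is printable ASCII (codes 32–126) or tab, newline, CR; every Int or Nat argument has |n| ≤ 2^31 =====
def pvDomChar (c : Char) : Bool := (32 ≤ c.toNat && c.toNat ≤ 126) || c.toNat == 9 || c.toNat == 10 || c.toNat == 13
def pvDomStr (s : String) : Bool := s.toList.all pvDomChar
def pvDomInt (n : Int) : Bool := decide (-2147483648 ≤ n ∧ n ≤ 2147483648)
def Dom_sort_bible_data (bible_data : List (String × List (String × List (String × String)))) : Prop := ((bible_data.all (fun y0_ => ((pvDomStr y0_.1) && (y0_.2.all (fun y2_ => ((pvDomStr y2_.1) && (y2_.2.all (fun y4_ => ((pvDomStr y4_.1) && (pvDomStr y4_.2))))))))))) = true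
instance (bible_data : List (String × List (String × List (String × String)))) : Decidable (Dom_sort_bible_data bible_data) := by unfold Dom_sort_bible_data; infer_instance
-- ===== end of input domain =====

-- B reverses A's traversal (alternative decomposition): instead of scanning the fixed
-- BOOK_ORDER and probing the data, it sorts the data's present keys by a position-index map.

def pyBookOrder : List String := [
  "genesis", "exodus", "leviticus", "numbers", "deuteronomy", "joshua",
  "judges", "ruth", "1 samuel", "2 samuel", "1 kings", "2 kings",
  "1 chronicles", "2 chronicles", "ezra", "nehemiah", "esther", "job",
  "psalms", "proverbs", "ecclesiastes", "song of solomon", "isaiah",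
  "jeremiah", "lamentations", "ezekiel", "daniel", "hosea", "joel", "amos",
  "obadiah", "jonah", "micah", "nahum", "habakkuk", "zephaniah", "haggai",
  "zechariah", "malachi", "matthew", "mark", "luke", "john", "acts",
  "romans", "1 corinthians", "2 corinthians", "galatians", "ephesians",
  "philippians", "colossians", "1 thessalonians", "2 thessalonians",
  "1 timothy", "2 timothy", "titus", "philemon", "hebrews", "james",
  "1 peter", "2 peter", "1 john", "2 john", "3 john", "jude", "revelation"]

-- ===== PORT A =====
-- A's chapter dict comprehension: sort the (int(c), v) pairs by the int, rebuild a dict keyed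
-- str(ch).  int(c) is ported as (PySem.Int.ofStr? _).getD 0; Pre_ guarantees the parse succeeds.
def pyChaptersA (chapters : List (String × List (String × String))) : List (String × List (String × String)) :=
  ((PySem.List.sorted (chapters.map (fun cv => ((PySem.Int.ofStr? cv.1).getD 0, cv.2)))
      (fun x => x.1)).foldl
    (fun d p => d.insert (PySem.Int.toStr p.1) p.2)
    (PySem.Dict.empty : PySem.Dict String (List (String × String)))).items

-- 'book in bible_data' + 'bible_data[book]' (first-match dict lookup) merged into one find?
def sort_bible_data (bible_data : List (String × List (String × List (String × String)))) : List (String × List (String × List (String × String))) :=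
  (pyBookOrder.foldl
    (fun sorted_data book =>
      match bible_data.find? (fun p => p.1 == book) with
      | some p => sorted_data.insert book (pyChaptersA p.2)
      | none => sorted_data)
    (PySem.Dict.empty : PySem.Dict String (List (String × List (String × String))))).items

-- ===== PORT B =====
-- B's chapter dict comprehension: sort the items themselves by int of the key
def pyChaptersB (chapters : List (String × List (String × String))) : List (String × List (String × String)) :=
  ((PySem.List.sorted chapters (fun kv => (PySem.Int.ofStr? kv.1).getD 0)).foldl
    (fun d cv => d.insert (PySem.Int.toStr ((PySem.Int.ofStr? cv.1).getD 0)) cv.2)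
    (PySem.Dict.empty : PySem.Dict String (List (String × String)))).items

def sort_bible_data_alt (bible_data : List (String × List (String × List (String × String)))) : List (String × List (String × List (String × String))) :=
  let index : PySem.Dict String Int :=
    (PySem.List.enumerate pyBookOrder).foldl (fun d p => d.insert p.2 p.1) PySem.Dict.empty
  let books := PySem.List.sorted
    ((PySem.List.dedup (bible_data.map Prod.fst)).filter (fun b => index.contains b))
    (fun b => index.getD b 0)
  (books.foldl
    (fun d b =>
      d.insert b (pyChaptersB (((bible_data.find? (fun p => p.1 == b)).map Prod.snd).getD [])))
    (PySem.Dict.empty : PySem.Dict String (List (String × List (String × String))))).items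

-- ===== PRECONDITION & SPEC =====
-- Pre_ excludes exactly the inputs on which A raises ValueError: a chapter key, of a book
-- that is in BOOK_ORDER and is the looked-up (first-match) entry, that int() cannot parse.
def Pre_sort_bible_data (bible_data : List (String × List (String × List (String × String)))) : Prop :=
  ∀ p ∈ bible_data, p.1 ∈ pyBookOrder →
    (bible_data.find? (fun q => q.1 == p.1) == some p) = true →
    ∀ cv ∈ p.2, (PySem.Int.ofStr? cv.1).isSome = true
instance (bible_data : List (String × List (String × List (String × String)))) : Decidable (Pre_sort_bible_data bible_data) := by unfold Pre_sort_bible_data; infer_instance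

def pvWitness_sort_bible_data : (List (String × List (String × List (String × String)))) :=
  [("exodus", [("2", [("1", "And these are the names")]), ("1", [("1", "x"), ("2", "y")])]),
   ("genesis", [("10", []), ("2", [("3", "z")])]),
   ("not a book", [("oops", [])])]

def Spec_sort_bible_data (bible_data : List (String × List (String × List (String × String)))) (out : List (String × List (String × List (String × String)))) : Prop := out = sort_bible_data_alt bible_data
instance (bible_data : List (String × List (String × List (String × String)))) (out : List (String × List (String × List (String × String)))) : Decidable (Spec_sort_bible_data bible_data out) := by unfold Spec_sort_bible_data; infer_instance

-- ===== CLAIM (what is proved, stated in full; the proofs are below) =====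
def Claim_equal_sort_bible_data : Prop := ∀ (bible_data : List (String × List (String × List (String × String)))), Dom_sort_bible_data bible_data → Pre_sort_bible_data bible_data → Spec_sort_bible_data bible_data (sort_bible_data bible_data)

-- ===== LEMMAS AND PROOFS =====

-- insertBy commutes with map when the comparison factors through the map
theorem insertBy_map {α β : Type} (f : α → β) (cmpa : α → α → Bool) (cmpb : β → β → Bool)
    (h : ∀ a b, cmpb (f a) (f b) = cmpa a b) (x : α) (l : List α) :
    PySem.List.insertBy cmpb (f x) (l.map f) = (PySem.List.insertBy cmpa x l).map f := by
  induction l with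
  | nil => simp [PySem.List.insertBy]
  | cons y ys ih =>
      simp only [List.map_cons, PySem.List.insertBy, h]
      by_cases hc : cmpa x y = true
      · simp [hc]
      · simp only [Bool.not_eq_true] at hc
        simp [hc, ih]

-- stable sort of a mapped list by a key on the image = map of the sort by the composed key
theorem sorted_map_comm {α β κ : Type} [LT κ] [DecidableLT κ]
    (xs : List α) (f : α → β) (kb : β → κ) :
    PySem.List.sorted (xs.map f) kb = (PySem.List.sorted xs (fun a => kb (f a))).map f := by
  rw [PySem.List.sorted_eq_foldl_insertBy, PySem.List.sorted_eq_foldl_insertBy, List.foldl_map]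
  suffices h : ∀ (acc : List α),
      xs.foldl (fun acc x => PySem.List.insertBy (fun a b => decide (kb a < kb b)) (f x) acc) (acc.map f)
        = (xs.foldl (fun acc x => PySem.List.insertBy (fun a b => decide (kb (f a) < kb (f b))) x acc) acc).map f by
    simpa using h []
  induction xs with
  | nil => intro acc; simp
  | cons x xs ih =>
      intro acc
      simp only [List.foldl_cons]
      rw [insertBy_map f (fun a b => decide (kb (f a) < kb (f b))) (fun a b => decide (kb a < kb b)) (fun _ _ => rfl)]
      exact ih _

-- the two chapter builders agree
theorem chapters_eq (chapters : List (String × List (String × String))) :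
    pyChaptersA chapters = pyChaptersB chapters := by
  unfold pyChaptersA pyChaptersB
  rw [sorted_map_comm chapters (fun cv => ((PySem.Int.ofStr? cv.1).getD 0, cv.2)) (fun x => x.1),
    List.foldl_map]

-- dict-fold facts ---------------------------------------------------------

theorem contains_foldl_insert (xs : List (Int × String))
    (d : PySem.Dict String Int) (b : String) :
    ((xs.foldl (fun d p => d.insert p.2 p.1) d).contains b)
      = (decide (b ∈ xs.map Prod.snd) || d.contains b) := by
  induction xs generalizing d with
  | nil => simp
  | cons p ps ih =>
      simp only [List.foldl_cons, ih, List.map_cons, List.mem_cons,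
        PySem.Dict.contains_insert]
      by_cases hb : b = p.2
      · simp [hb]
      · have hbf : (b == p.2) = false := beq_eq_false_iff_ne.mpr hb
        simp [hb, hbf]

theorem getD_foldl_insert_of_not_mem (xs : List (Int × String))
    (d : PySem.Dict String Int) (b : String) (h : b ∉ xs.map Prod.snd) :
    (xs.foldl (fun d p => d.insert p.2 p.1) d).getD b 0 = d.getD b 0 := by
  induction xs generalizing d with
  | nil => rfl
  | cons p ps ih =>
      simp only [List.map_cons, List.mem_cons, not_or] at h
      simp only [List.foldl_cons, ih _ h.2, PySem.Dict.getD_insert_of_ne _ _ _ h.1]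

theorem getD_index_fold (bs : List String) (s : Int) (d : PySem.Dict String Int)
    (b : String) (hn : bs.Nodup) (hb : b ∈ bs) :
    ((PySem.List.enumerate bs s).foldl (fun d p => d.insert p.2 p.1) d).getD b 0
      = s + bs.idxOf b := by
  induction bs generalizing s d with
  | nil => cases hb
  | cons x xs ih =>
      rw [PySem.List.enumerate_cons]
      simp only [List.foldl_cons]
      rcases List.mem_cons.mp hb with h | h
      · subst h
        have hx : b ∉ xs := (List.nodup_cons.mp hn).1
        have := getD_foldl_insert_of_not_mem (PySem.List.enumerate xs (s + 1))
          (d.insert b s) b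
          (by rw [show (List.map Prod.snd (PySem.List.enumerate xs (s+1))) = xs from PySem.List.map_snd_enumerate xs (s+1)]; exact hx)
        simpa [PySem.Dict.getD_insert_self] using this
      · have hne : b ≠ x := fun he => (List.nodup_cons.mp hn).1 (he ▸ h)
        rw [ih (s + 1) (d.insert x s) (List.nodup_cons.mp hn).2 h,
          List.idxOf_cons_ne _ (fun he => hne he.symm)]
        push_cast
        ring

-- the index dict: contains ↔ membership in BOOK_ORDER
theorem index_contains (b : String) :
    ((PySem.List.enumerate pyBookOrder).foldl (fun d p => d.insert p.2 p.1)
        (PySem.Dict.empty : PySem.Dict String Int)).contains b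
      = decide (b ∈ pyBookOrder) := by
  have := contains_foldl_insert (PySem.List.enumerate pyBookOrder)
    (PySem.Dict.empty : PySem.Dict String Int) b
  simpa [PySem.List.map_snd_enumerate] using this

set_option maxRecDepth 100000 in
theorem nodup_pyBookOrder : pyBookOrder.Nodup := by decide

-- BOOK_ORDER is strictly increasing under the index dict
theorem pairwise_index :
    pyBookOrder.Pairwise (fun a b =>
      ((PySem.List.enumerate pyBookOrder).foldl (fun d p => d.insert p.2 p.1)
          (PySem.Dict.empty : PySem.Dict String Int)).getD a 0
        < ((PySem.List.enumerate pyBookOrder).foldl (fun d p => d.insert p.2 p.1)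
            (PySem.Dict.empty : PySem.Dict String Int)).getD b 0) := by
  rw [List.pairwise_iff_getElem]
  intro i j hi hj hij
  rw [getD_index_fold pyBookOrder 0 _ _ nodup_pyBookOrder (List.getElem_mem hi),
    getD_index_fold pyBookOrder 0 _ _ nodup_pyBookOrder (List.getElem_mem hj),
    List.Nodup.idxOf_getElem nodup_pyBookOrder i hi,
    List.Nodup.idxOf_getElem nodup_pyBookOrder j hj]
  omega

-- fold of key-value inserts with fresh nodup keys, flattened to a plain list
theorem items_foldl_insert {V : Type} (g : String → Option V) (bs : List String)
    (d : PySem.Dict String V) (hn : bs.Nodup) (hf : ∀ b ∈ bs, d.contains b = false) :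
    (bs.foldl (fun d b => (g b).elim d (fun v => d.insert b v)) d).items
      = d.items ++ bs.filterMap (fun b => (g b).map (fun v => (b, v))) := by
  induction bs generalizing d with
  | nil => simp
  | cons b bs ih =>
      have hnb := List.nodup_cons.mp hn
      simp only [List.foldl_cons, List.filterMap_cons]
      cases hg : g b with
      | none =>
          have hacc : (Option.elim (none : Option V) d fun v => d.insert b v) = d := rfl
          rw [hacc, ih d hnb.2 (fun x hx => hf x (List.mem_cons_of_mem _ hx))]
          simp
      | some v =>
          have hacc : (Option.elim (some v) d fun v => d.insert b v) = d.insert b v := rfl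
          rw [hacc]
          have hc : d.contains b = false := hf b List.mem_cons_self
          rw [ih (d.insert b v) hnb.2 (fun x hx => by
              rw [PySem.Dict.contains_insert]
              have hne : x ≠ b := fun he => hnb.1 (he ▸ hx)
              have hbf : (x == b) = false := beq_eq_false_iff_ne.mpr hne
              simp [hbf, hf x (List.mem_cons_of_mem _ hx)]),
            PySem.Dict.items_insert_of_not_contains d v hc]
          simp

-- A's filterMap over BOOK_ORDER = map over the filtered BOOK_ORDER with B's payload
theorem filterMap_find (bd : List (String × List (String × List (String × String))))
    (bs : List String) :
    bs.filterMap (fun b => ((bd.find? (fun p => p.1 == b)).map (fun p => pyChaptersA p.2)).map (fun v => (b, v)))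
      = (bs.filter (fun b => (bd.find? (fun p => p.1 == b)).isSome)).map
          (fun b => (b, pyChaptersB (((bd.find? (fun p => p.1 == b)).map Prod.snd).getD []))) := by
  induction bs with
  | nil => rfl
  | cons b bs ih =>
      simp only [List.filterMap_cons, List.filter_cons]
      cases hg : bd.find? (fun p => p.1 == b) with
      | none => simpa [hg] using ih
      | some p => simpa [hg, chapters_eq] using ih

theorem find?_isSome_iff_mem_fst (bd : List (String × List (String × List (String × String))))
    (a : String) :
    (bd.find? (fun p => p.1 == a)).isSome = true ↔ a ∈ bd.map Prod.fst := by
  rw [List.find?_isSome]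
  simp only [beq_iff_eq, List.mem_map]

theorem empty_items {κ ν : Type} : (PySem.Dict.empty : PySem.Dict κ ν).items = [] := rfl

-- ===== VERDICT (by name: the statement is the Claim_ definition above) =====
theorem sort_bible_data_spec : Claim_equal_sort_bible_data := by
  intro bd _ _
  unfold Spec_sort_bible_data
  have hA : sort_bible_data bd
      = pyBookOrder.filterMap (fun b => ((bd.find? (fun p => p.1 == b)).map (fun p => pyChaptersA p.2)).map (fun v => (b, v))) := by
    unfold sort_bible_data
    have hfun : (fun (sorted_data : PySem.Dict String (List (String × List (String × String)))) book =>
        match bd.find? (fun p => p.1 == book) with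
        | some p => sorted_data.insert book (pyChaptersA p.2)
        | none => sorted_data)
      = (fun d b => ((bd.find? (fun p => p.1 == b)).map (fun p => pyChaptersA p.2)).elim d (fun v => d.insert b v)) := by
      funext d b; cases bd.find? (fun p => p.1 == b) <;> rfl
    rw [hfun, items_foldl_insert (fun b => (bd.find? (fun p => p.1 == b)).map (fun p => pyChaptersA p.2)) pyBookOrder _ nodup_pyBookOrder
      (fun b _ => PySem.Dict.contains_empty b), empty_items]
    rfl
  have hbooks : PySem.List.sorted
      ((PySem.List.dedup (bd.map Prod.fst)).filter
        (fun b => ((PySem.List.enumerate pyBookOrder).foldl (fun d p => d.insert p.2 p.1)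
          (PySem.Dict.empty : PySem.Dict String Int)).contains b))
      (fun b => ((PySem.List.enumerate pyBookOrder).foldl (fun d p => d.insert p.2 p.1)
        (PySem.Dict.empty : PySem.Dict String Int)).getD b 0)
      = pyBookOrder.filter (fun b => (bd.find? (fun p => p.1 == b)).isSome) := by
    apply PySem.List.sorted_eq_of_perm_of_pairwise_lt
    · apply (List.perm_ext_iff_of_nodup
        (List.Nodup.filter _ nodup_pyBookOrder)
        (List.Nodup.filter _ (PySem.List.nodup_dedup (bd.map Prod.fst)))).mpr
      intro a
      simp only [List.mem_filter, PySem.List.mem_dedup, index_contains,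
        find?_isSome_iff_mem_fst, decide_eq_true_eq]
      tauto
    · exact List.Pairwise.filter _ pairwise_index
  have hB : sort_bible_data_alt bd
      = (pyBookOrder.filter (fun b => (bd.find? (fun p => p.1 == b)).isSome)).map
          (fun b => (b, pyChaptersB (((bd.find? (fun p => p.1 == b)).map Prod.snd).getD []))) := by
    unfold sort_bible_data_alt
    simp only []
    rw [hbooks]
    rw [show (fun (d : PySem.Dict String (List (String × List (String × String)))) b =>
        d.insert b (pyChaptersB (((bd.find? (fun p => p.1 == b)).map Prod.snd).getD [])))
      = (fun d b => (some (pyChaptersB (((bd.find? (fun p => p.1 == b)).map Prod.snd).getD []))).elim d (fun v => d.insert b v)) from rfl]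
    rw [items_foldl_insert (fun b => some (pyChaptersB (((bd.find? (fun p => p.1 == b)).map Prod.snd).getD []))) _ _ (List.Nodup.filter _ nodup_pyBookOrder)
      (fun b _ => PySem.Dict.contains_empty b), empty_items]
    simp
  rw [hA, hB, filterMap_find]
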